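-- pv_equiv track=rewrite | github.com/alexey198631/trainings | edx_introduction_to_computer_science_and_programming_using_Python/Additional_units/unit 6 Algorithmic Complexity /test1.py | program1
-- ===== SOURCE A (Python) =====
-- def program1(x):
--     step = 0
--     total = 0
--     step += 1
--
--     for i in range(1000):
--         step += 1
--         total += i
--         step += 1
--
--     while x > 0:
--         step += 1
--         x -= 1
--         step += 1
--         total += x
--         step += 1
--
--     step += 1
--
--     return total, step + 1
-- ===== SOURCE B (Python) =====
-- def program1(x):
--     total = 499500
--     step = 2003
--     if x > 0:
--         total += x * (x - 1) // 2
--         step += 3 * x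
--     return total, step
-- ===== Notes on version B (the rewrite author's own statement) =====
-- stated objective: faster
-- what changed: Replaced the 1000-iteration for-loop and the x-iteration while-loop (with step counting) by closed-form arithmetic: total = 499500 + x*(x-1)//2 and step = 2003 + 3*x for x > 0.
import Mathlib
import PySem

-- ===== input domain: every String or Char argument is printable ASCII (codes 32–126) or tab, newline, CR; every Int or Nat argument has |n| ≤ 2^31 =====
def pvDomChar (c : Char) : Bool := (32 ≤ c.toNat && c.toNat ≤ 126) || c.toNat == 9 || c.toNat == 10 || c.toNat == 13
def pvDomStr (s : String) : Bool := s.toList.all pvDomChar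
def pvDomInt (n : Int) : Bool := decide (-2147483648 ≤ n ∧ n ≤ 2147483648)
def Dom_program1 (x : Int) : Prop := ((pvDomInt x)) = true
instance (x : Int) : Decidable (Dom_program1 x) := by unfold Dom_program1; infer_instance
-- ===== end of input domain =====

-- B replaces A's 1000-iteration for-loop and x-iteration while-loop by closed-form formulas (O(1)).

-- ===== PORT A =====
-- the while loop of A: state (x, step, total); terminates since x decreases while positive
def program1While (x step total : Int) : Int × Int × Int :=
  if h : x > 0 then
    program1While (x - 1) (step + 3) (total + (x - 1))
  else (x, step, total)
termination_by x.toNat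
decreasing_by
  have : x - 1 < x := by omega
  omega

def program1 (x : Int) : Int × Int :=
  let step : Int := 0
  let total : Int := 0
  let step := step + 1
  -- for i in range(1000): step += 1; total += i; step += 1
  let (step, total) := (PySem.List.pyRange 0 1000 1).foldl
    (fun (st : Int × Int) i => (st.1 + 2, st.2 + i)) (step, total)
  let (_, step, total) := program1While x step total
  let step := step + 1
  (total, step + 1)

-- ===== PORT B =====
def program1_alt (x : Int) : Int × Int :=
  let total : Int := 499500
  let step : Int := 2003
  if x > 0 then (total + PySem.Int.floordiv (x * (x - 1)) 2, step + 3 * x)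
  else (total, step)

-- ===== PRECONDITION & SPEC =====
def Spec_program1 (x : Int) (out : Int × Int) : Prop := out = program1_alt x
instance (x : Int) (out : Int × Int) : Decidable (Spec_program1 x out) := by unfold Spec_program1; infer_instance

-- ===== CLAIM (what is proved, stated in full; the proofs are below) =====
def Claim_equal_program1 : Prop := ∀ (x : Int), Dom_program1 x → Spec_program1 x (program1 x)

-- ===== LEMMAS AND PROOFS =====

theorem program1While_closed (n : Nat) : ∀ (x step total : Int), x.toNat = n → 0 < x →
    program1While x step total = (0, step + 3 * x, total + x * (x - 1) / 2) := by
  induction n with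
  | zero => intro x step total hx hpos; omega
  | succ k ih =>
    intro x step total hx hpos
    rw [program1While]
    simp only [hpos, dif_pos]
    by_cases h1 : 0 < x - 1
    · rw [ih (x - 1) (step + 3) (total + (x - 1)) (by omega) h1]
      refine Prod.ext rfl (Prod.ext ?_ ?_) <;> simp <;> [ring_nf; skip]
      have : (x - 1) * (x - 1 - 1) / 2 + (x - 1) = x * (x - 1) / 2 := by
        have h2 : (x - 1) * (x - 1 - 1) = x * (x - 1) - 2 * (x - 1) := by ring
        omega
      omega
    · have hx1 : x = 1 := by omega
      subst hx1
      rw [program1While]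
      norm_num

set_option maxRecDepth 100000 in
theorem program1_range_fold :
    (PySem.List.pyRange 0 1000 1).foldl (fun (st : Int × Int) i => (st.1 + 2, st.2 + i)) (0 + 1, 0)
      = (2001, 499500) := by decide

-- ===== VERDICT (by name: the statement is the Claim_ definition above) =====
theorem program1_spec : Claim_equal_program1 := by
  intro x _
  unfold Spec_program1 program1 program1_alt
  simp only []
  rw [program1_range_fold]
  by_cases h : 0 < x
  · rw [program1While_closed x.toNat x 2001 499500 rfl h]
    simp only [h, if_pos]
    have heven : (2:Int) ∣ x * (x - 1) := (Int.even_mul_pred_self x).two_dvd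
    refine Prod.ext ?_ ?_ <;> simp [PySem.Int.floordiv]
    · rw [Int.fdiv_eq_ediv_of_dvd heven]
    · ring
  · rw [program1While]
    simp [h]
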